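-- pv_equiv track=rewrite | github.com/OllieRylance/clozeFlashcardGenerator | algorithms.py | generateNewCombinations
-- ===== SOURCE A (Python) =====
-- from typing import Dict, List, Optional, Tuple
-- from itertools import combinations
--
-- def generateNewCombinations(
--     lineIds: List[int],
--     inUseIds: List[int],
--     n: int
-- ) -> List[Tuple[int, ...]]:
--     """
--     Generate new combinations of line IDs that include the in-use cloze flashcards.
--     """
--     newCombinations: List[Tuple[int, ...]] = []
--
--     # Generate all combinations of n lines
--     for combination in combinations(lineIds, n):
--         # Create a new combination that includes the in-use cloze flashcards
--         newCombination: Tuple[int, ...] = tuple(inUseIds) + combination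
--         newCombinations.append(newCombination)
--
--     return newCombinations
-- ===== SOURCE B (Python) =====
-- def generateNewCombinations(lineIds, inUseIds, n):
--     """
--     Generate new combinations of line IDs that include the in-use cloze flashcards.
--     Recursive decomposition: each size-n selection either takes the first remaining
--     line id or skips it, in lexicographic (positional) order.
--     """
--     def go(prefix, xs, k):
--         if k == 0:
--             return [prefix]
--         if not xs:
--             return []
--         return go(prefix + (xs[0],), xs[1:], k - 1) + go(prefix, xs[1:], k)
--     return go(tuple(inUseIds), tuple(lineIds), n)
-- ===== Notes on version B (the rewrite author's own statement) =====
-- stated objective: alternative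
-- what changed: Replaces the itertools.combinations library call with a direct take-or-skip recursion that threads the growing (inUseIds ++ chosen) prefix, so the final prepend pass disappears.
import Mathlib
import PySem

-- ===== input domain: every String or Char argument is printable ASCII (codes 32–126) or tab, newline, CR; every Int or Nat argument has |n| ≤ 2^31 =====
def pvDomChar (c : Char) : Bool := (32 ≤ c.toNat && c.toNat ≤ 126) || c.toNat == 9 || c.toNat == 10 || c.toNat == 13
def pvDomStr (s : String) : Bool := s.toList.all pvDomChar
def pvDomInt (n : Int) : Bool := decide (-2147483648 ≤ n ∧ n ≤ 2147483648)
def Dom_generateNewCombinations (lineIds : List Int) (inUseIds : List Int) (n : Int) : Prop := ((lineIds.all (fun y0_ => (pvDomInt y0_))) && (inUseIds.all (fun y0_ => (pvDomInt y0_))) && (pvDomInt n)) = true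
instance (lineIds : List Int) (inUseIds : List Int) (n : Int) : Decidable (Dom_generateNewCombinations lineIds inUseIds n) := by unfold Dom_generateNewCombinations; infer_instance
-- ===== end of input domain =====

-- B replaces the itertools.combinations call with a take-or-skip recursion threading the
-- (inUseIds ++ chosen) pre; same cost, different decomposition. Return-value equivalence.

-- ===== PORT A =====
-- itertools.combinations(lineIds, n) for n ≥ 0, in its lexicographic positional order
def pyCombinations (k : Nat) (xs : List Int) : List (List Int) :=
  match k, xs with
  | 0, _ => [[]]
  | _ + 1, [] => []
  | k' + 1, x :: rest =>
      (pyCombinations k' rest).map (fun c => x :: c) ++ pyCombinations (k' + 1) rest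

def generateNewCombinations (lineIds : List Int) (inUseIds : List Int) (n : Int) : List (List Int) :=
  -- the for-loop appending tuple(inUseIds) + combination; n < 0 raises in Python (outside Pre_)
  (pyCombinations n.toNat lineIds).foldl (fun acc c => acc ++ [inUseIds ++ c]) []

-- ===== PORT B =====
def goB (pre : List Int) (xs : List Int) (k : Int) : List (List Int) :=
  match xs with
  | [] => if k = 0 then [pre] else []
  | x :: rest =>
      if k = 0 then [pre]
      else goB (pre ++ [x]) rest (k - 1) ++ goB pre rest k

def generateNewCombinations_alt (lineIds : List Int) (inUseIds : List Int) (n : Int) : List (List Int) :=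
  goB inUseIds lineIds n

-- ===== PRECONDITION & SPEC =====
-- Pre_ excludes n < 0, where itertools.combinations raises ValueError (A returns no value).
def Pre_generateNewCombinations (lineIds : List Int) (inUseIds : List Int) (n : Int) : Prop := 0 ≤ n
instance (lineIds : List Int) (inUseIds : List Int) (n : Int) : Decidable (Pre_generateNewCombinations lineIds inUseIds n) := by unfold Pre_generateNewCombinations; infer_instance
def pvWitness_generateNewCombinations : List Int × List Int × Int := ([1, 2, 3], [7], 2)

def Spec_generateNewCombinations (lineIds : List Int) (inUseIds : List Int) (n : Int) (out : List (List Int)) : Prop := out = generateNewCombinations_alt lineIds inUseIds n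
instance (lineIds : List Int) (inUseIds : List Int) (n : Int) (out : List (List Int)) : Decidable (Spec_generateNewCombinations lineIds inUseIds n out) := by unfold Spec_generateNewCombinations; infer_instance

-- ===== CLAIM (what is proved, stated in full; the proofs are below) =====
def Claim_equal_generateNewCombinations : Prop := ∀ (lineIds : List Int) (inUseIds : List Int) (n : Int), Dom_generateNewCombinations lineIds inUseIds n → Pre_generateNewCombinations lineIds inUseIds n → Spec_generateNewCombinations lineIds inUseIds n (generateNewCombinations lineIds inUseIds n)

-- ===== LEMMAS AND PROOFS =====

theorem foldl_app_map (inUse : List Int) (l : List (List Int)) (acc : List (List Int)) :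
    l.foldl (fun acc c => acc ++ [inUse ++ c]) acc = acc ++ l.map (fun c => inUse ++ c) := by
  induction l generalizing acc with
  | nil => simp [List.foldl]
  | cons h t ih => simp [List.foldl, ih, List.append_assoc]

theorem goB_eq (xs : List Int) : ∀ (k : Int) (pre : List Int), 0 ≤ k →
    goB pre xs k = (pyCombinations k.toNat xs).map (fun c => pre ++ c) := by
  induction xs with
  | nil =>
      intro k pre hk
      rcases eq_or_lt_of_le hk with h | h
      · simp [goB, ← h, pyCombinations]
      · rw [goB]
        have hne : k ≠ 0 := by omega
        obtain ⟨m, hm⟩ : ∃ m : Nat, k.toNat = m + 1 := ⟨k.toNat - 1, by omega⟩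
        simp [hne, hm, pyCombinations]
  | cons x rest ih =>
      intro k pre hk
      rcases eq_or_lt_of_le hk with h | h
      · simp [goB, ← h, pyCombinations]
      · rw [goB]
        have hne : k ≠ 0 := by omega
        obtain ⟨m, hm⟩ : ∃ m : Nat, k.toNat = m + 1 := ⟨k.toNat - 1, by omega⟩
        have h1 : (k - 1).toNat = m := by omega
        rw [if_neg hne]
        rw [ih (k - 1) (pre ++ [x]) (by omega), ih k pre (le_of_lt h)]
        simp [hm, h1, pyCombinations, List.map_map, Function.comp]

-- ===== VERDICT (by name: the statement is the Claim_ definition above) =====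
theorem generateNewCombinations_spec : Claim_equal_generateNewCombinations := by
  intro lineIds inUseIds n _ hpre
  unfold Spec_generateNewCombinations generateNewCombinations generateNewCombinations_alt
  rw [foldl_app_map, goB_eq lineIds n inUseIds hpre]
  simp
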